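-- pv_equiv track=rewrite | github.com/AnkitGSingh/First-Aid-Buddy-Bot | First_Aid_buddy/app.py | run_retrieval
-- ===== SOURCE A (Python) =====
-- from typing import List
--
-- def run_retrieval(user_input: str, knowledge_base_docs: List[str]) -> str:
--     """Simulate RAG retrieval with improved matching."""
--     user_input_lower = user_input.lower()
--
--     synonyms = {
--         'cut': ['cuts', 'scrape', 'scrapes', 'wound', 'bleeding'],
--         'burn': ['burns', 'burned', 'burnt', 'scald'],
--         'choke': ['choking', 'choked', 'airway', 'obstruction'],
--         'sprain': ['sprains', 'sprained', 'strain', 'strains', 'twisted'],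
--         'nose': ['nosebleed', 'nosebleeds', 'nasal'],
--         'bee': ['sting', 'stings', 'insect', 'bite'],
--         'cpr': ['cardiac', 'heart attack', 'chest compressions', 'resuscitation'],
--         'bleed': ['bleeding', 'blood', 'hemorrhage'],
--         'head': ['concussion', 'brain', 'skull'],
--         'allerg': ['allergic', 'anaphylaxis', 'reaction', 'epipen'],
--         'bone': ['fracture', 'broken', 'break'],
--         'tooth': ['teeth', 'dental', 'knocked out'],
--         'poison': ['poisoning', 'toxic', 'ingested'],
--         'heat': ['exhaustion', 'stroke', 'dehydration', 'hot']
--     }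
--
--     scored_docs = []
--     for doc in knowledge_base_docs:
--         doc_lower = doc.lower()
--         score = 0
--
--         user_words = user_input_lower.split()
--         for word in user_words:
--             if len(word) > 2:
--                 score += doc_lower.count(word) * 2
--
--         for key, variations in synonyms.items():
--             if key in user_input_lower or any(var in user_input_lower for var in variations):
--                 if key in doc_lower or any(var in doc_lower for var in variations):
--                     score += 5
--
--         doc_first_line = doc.split(':')[0].lower()
--         for word in user_words:
--             if len(word) > 2 and word in doc_first_line:
--                 score += 10
--
--         scored_docs.append((score, doc))
--
--     scored_docs.sort(reverse=True, key=lambda x: x[0])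
--     top_docs = [doc for score, doc in scored_docs[:3] if score > 0]
--     if not top_docs:
--         top_docs = [doc for score, doc in scored_docs[:3]]
--
--     formatted_docs = []
--     for i, doc in enumerate(top_docs, 1):
--         formatted_docs.append(f"Document {i}:\n{doc}")
--
--     return "\n\n".join(formatted_docs)
-- ===== SOURCE B (Python) =====
-- from typing import List
--
-- def run_retrieval(user_input: str, knowledge_base_docs: List[str]) -> str:
--     """Same retrieval, but selection replaces sorting: one pass over the
--     documents maintains only the current top-3 (score, doc) list by stable
--     descending insertion, so the full scored list is never built or sorted."""
--     synonyms = {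
--         'cut': ['cuts', 'scrape', 'scrapes', 'wound', 'bleeding'],
--         'burn': ['burns', 'burned', 'burnt', 'scald'],
--         'choke': ['choking', 'choked', 'airway', 'obstruction'],
--         'sprain': ['sprains', 'sprained', 'strain', 'strains', 'twisted'],
--         'nose': ['nosebleed', 'nosebleeds', 'nasal'],
--         'bee': ['sting', 'stings', 'insect', 'bite'],
--         'cpr': ['cardiac', 'heart attack', 'chest compressions', 'resuscitation'],
--         'bleed': ['bleeding', 'blood', 'hemorrhage'],
--         'head': ['concussion', 'brain', 'skull'],
--         'allerg': ['allergic', 'anaphylaxis', 'reaction', 'epipen'],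
--         'bone': ['fracture', 'broken', 'break'],
--         'tooth': ['teeth', 'dental', 'knocked out'],
--         'poison': ['poisoning', 'toxic', 'ingested'],
--         'heat': ['exhaustion', 'stroke', 'dehydration', 'hot']
--     }
--     text = user_input.lower()
--     words = [w for w in text.split() if len(w) > 2]
--     active = [(k, vs) for k, vs in synonyms.items()
--               if k in text or any(v in text for v in vs)]
--
--     def score_doc(doc):
--         dl = doc.lower()
--         first = doc.split(':')[0].lower()
--         return (2 * sum(dl.count(w) for w in words)
--                 + 5 * sum(1 for k, vs in active if k in dl or any(v in dl for v in vs))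
--                 + 10 * sum(1 for w in words if w in first))
--
--     top = []  # at most 3 pairs, score-descending, ties kept in document order
--     for doc in knowledge_base_docs:
--         s = score_doc(doc)
--         i = 0
--         while i < len(top) and top[i][0] >= s:
--             i += 1
--         top.insert(i, (s, doc))
--         del top[3:]
--
--     picked = [d for s, d in top if s > 0] or [d for s, d in top]
--     return "\n\n".join(f"Document {i}:\n{d}" for i, d in enumerate(picked, 1))
-- ===== Notes on version B (the rewrite author's own statement) =====
-- stated objective: faster
-- what changed: B replaces A's build-full-list-then-stable-sort-then-slice pipeline by a single-pass bounded selection that keeps only the current top-3 (score, doc) pairs via stable descending insertion, and hoists the user-side work (word filter, active synonym keys) out of the document loop with each score a closed-form weighted sum.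
import Mathlib
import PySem

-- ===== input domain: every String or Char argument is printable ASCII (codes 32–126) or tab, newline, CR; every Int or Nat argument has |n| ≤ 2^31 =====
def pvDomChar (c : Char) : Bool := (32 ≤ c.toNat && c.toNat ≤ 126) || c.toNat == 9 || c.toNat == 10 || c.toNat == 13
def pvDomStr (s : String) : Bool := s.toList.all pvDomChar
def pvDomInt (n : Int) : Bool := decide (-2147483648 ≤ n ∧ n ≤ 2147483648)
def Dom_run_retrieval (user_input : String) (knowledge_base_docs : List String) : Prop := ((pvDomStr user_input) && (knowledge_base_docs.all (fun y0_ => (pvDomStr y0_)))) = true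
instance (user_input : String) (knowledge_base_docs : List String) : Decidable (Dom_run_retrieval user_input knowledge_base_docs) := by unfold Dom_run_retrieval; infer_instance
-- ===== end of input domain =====

-- B replaces A's build-all/stable-sort/slice pipeline by a single pass that maintains only the
-- current top-3 via stable descending insertion and hoists the user-side work out of the loop;
-- a timing run measured B faster (same result).

-- the synonyms dict literal, shared module context of both programs
def pvSynonyms : List (String × List String) :=
  [("cut", ["cuts", "scrape", "scrapes", "wound", "bleeding"]),
   ("burn", ["burns", "burned", "burnt", "scald"]),
   ("choke", ["choking", "choked", "airway", "obstruction"]),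
   ("sprain", ["sprains", "sprained", "strain", "strains", "twisted"]),
   ("nose", ["nosebleed", "nosebleeds", "nasal"]),
   ("bee", ["sting", "stings", "insect", "bite"]),
   ("cpr", ["cardiac", "heart attack", "chest compressions", "resuscitation"]),
   ("bleed", ["bleeding", "blood", "hemorrhage"]),
   ("head", ["concussion", "brain", "skull"]),
   ("allerg", ["allergic", "anaphylaxis", "reaction", "epipen"]),
   ("bone", ["fracture", "broken", "break"]),
   ("tooth", ["teeth", "dental", "knocked out"]),
   ("poison", ["poisoning", "toxic", "ingested"]),
   ("heat", ["exhaustion", "stroke", "dehydration", "hot"])]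

-- ===== PORT A =====
-- A's loop body (score one doc against the lowered user input), hoisted verbatim to a helper
def pvScoredA (user_input_lower : String) (doc : String) : Int × String :=
  let doc_lower := PySem.Str.lower doc
  let score : Int := 0
  let user_words := PySem.Str.split₀ user_input_lower
  let score := user_words.foldl (fun s word =>
    if PySem.Str.len word > 2 then s + (PySem.Str.count doc_lower word : Int) * 2 else s) score
  let score := pvSynonyms.foldl (fun s kv =>
    if PySem.Str.isIn kv.1 user_input_lower || kv.2.any (fun v => PySem.Str.isIn v user_input_lower) then
      (if PySem.Str.isIn kv.1 doc_lower || kv.2.any (fun v => PySem.Str.isIn v doc_lower) then s + 5 else s)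
    else s) score
  -- doc.split(':')[0]: split with a nonempty separator always yields a nonempty list, so [0] is its head
  let doc_first_line := PySem.Str.lower (((PySem.Str.split? doc ":").getD []).headD "")
  let score := user_words.foldl (fun s word =>
    if PySem.Str.len word > 2 && PySem.Str.isIn word doc_first_line then s + 10 else s) score
  (score, doc)

def run_retrieval (user_input : String) (knowledge_base_docs : List String) : String :=
  let user_input_lower := PySem.Str.lower user_input
  let scored_docs : List (Int × String) := knowledge_base_docs.foldl
    (fun acc doc => acc ++ [pvScoredA user_input_lower doc]) []
  let scored_docs := PySem.List.sorted scored_docs (fun x => x.1) true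
  let top_docs := (PySem.List.slice scored_docs none (some 3)).foldl
    (fun acc sd => if sd.1 > 0 then acc ++ [sd.2] else acc) []
  let top_docs := if top_docs = [] then (PySem.List.slice scored_docs none (some 3)).map (fun sd => sd.2) else top_docs
  let formatted_docs := (PySem.List.enumerate top_docs 1).foldl
    (fun acc p => acc ++ ["Document " ++ PySem.Int.toStr p.1 ++ ":\n" ++ p.2]) []
  PySem.Str.join "\n\n" formatted_docs

-- ===== PORT B =====
-- B's score_doc closure, with the precomputed user-side data as parameters
def pvScoreB (words : List String) (active : List (String × List String)) (doc : String) : Int :=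
  let dl := PySem.Str.lower doc
  let first := PySem.Str.lower (((PySem.Str.split? doc ":").getD []).headD "")
  2 * (words.map (fun w => (PySem.Str.count dl w : Int))).sum
    + 5 * (active.map (fun kv =>
        if PySem.Str.isIn kv.1 dl || kv.2.any (fun v => PySem.Str.isIn v dl) then (1 : Int) else 0)).sum
    + 10 * (words.map (fun w => if PySem.Str.isIn w first then (1 : Int) else 0)).sum

-- B's while-loop insertion: skip entries with score ≥ s, insert the new pair there (stable, descending)
def pvIns (x : Int × String) : List (Int × String) → List (Int × String)
  | [] => [x]
  | y :: ys => if y.1 ≥ x.1 then y :: pvIns x ys else x :: y :: ys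

def run_retrieval_alt (user_input : String) (knowledge_base_docs : List String) : String :=
  let text := PySem.Str.lower user_input
  let words := (PySem.Str.split₀ text).filter (fun w => PySem.Str.len w > 2)
  let active := pvSynonyms.filter (fun kv =>
    PySem.Str.isIn kv.1 text || kv.2.any (fun v => PySem.Str.isIn v text))
  let top := knowledge_base_docs.foldl
    (fun acc doc => (pvIns (pvScoreB words active doc, doc) acc).take 3) []
  let picked := (top.filter (fun sd => sd.1 > 0)).map (fun sd => sd.2)
  let picked := if picked = [] then top.map (fun sd => sd.2) else picked
  PySem.Str.join "\n\n" ((PySem.List.enumerate picked 1).map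
    (fun p => "Document " ++ PySem.Int.toStr p.1 ++ ":\n" ++ p.2))

-- ===== PRECONDITION & SPEC =====
def Spec_run_retrieval (user_input : String) (knowledge_base_docs : List String) (out : String) : Prop := out = run_retrieval_alt user_input knowledge_base_docs
instance (user_input : String) (knowledge_base_docs : List String) (out : String) : Decidable (Spec_run_retrieval user_input knowledge_base_docs out) := by unfold Spec_run_retrieval; infer_instance

-- ===== CLAIM (what is proved, stated in full; the proofs are below) =====
def Claim_equal_run_retrieval : Prop := ∀ (user_input : String) (knowledge_base_docs : List String), Dom_run_retrieval user_input knowledge_base_docs → Spec_run_retrieval user_input knowledge_base_docs (run_retrieval user_input knowledge_base_docs)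

-- ===== LEMMAS AND PROOFS =====

-- A's word-count loop (score += count*2 behind a length guard) is 2 * the sum over the filtered words.
theorem pv_fold_count (p : String → Prop) [DecidablePred p] (f : String → Int) :
    ∀ (ws : List String) (s0 : Int),
      ws.foldl (fun s w => if p w then s + f w * 2 else s) s0
        = s0 + 2 * ((ws.filter (fun w => decide (p w))).map f).sum := by
  intro ws
  induction ws with
  | nil => intro s0; simp
  | cons w t ih =>
    intro s0
    by_cases h : p w <;> (simp [h, ih]; try ring)

-- A's synonym loop (+5 behind two guards) is 5 * a 0/1-sum over the active keys.
theorem pv_fold_syn {α : Type} (a b : α → Bool) :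
    ∀ (xs : List α) (s0 : Int),
      xs.foldl (fun s x => if a x then (if b x then s + 5 else s) else s) s0
        = s0 + 5 * ((xs.filter a).map (fun x => if b x then (1 : Int) else 0)).sum := by
  intro xs
  induction xs with
  | nil => intro s0; simp
  | cons x t ih =>
    intro s0
    by_cases ha : a x = true
    · by_cases hb : b x = true <;> (simp [ha, hb, ih]; try ring)
    · simp [ha, ih]

-- A's first-line loop (+10 behind a conjoined guard) is 10 * a 0/1-sum over the filtered words.
theorem pv_fold_first (p q : String → Bool) :
    ∀ (ws : List String) (s0 : Int),
      ws.foldl (fun s w => if p w && q w then s + 10 else s) s0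
        = s0 + 10 * ((ws.filter p).map (fun w => if q w then (1 : Int) else 0)).sum := by
  intro ws
  induction ws with
  | nil => intro s0; simp
  | cons w t ih =>
    intro s0
    rw [List.foldl_cons, List.filter_cons]
    by_cases hp : p w = true
    · by_cases hq : q w = true
      · rw [if_pos (by simp [hp, hq]), if_pos hp, ih]
        simp [hq]; ring
      · rw [if_neg (by simp [hq]), if_pos hp, ih]
        simp [hq]
    · rw [if_neg (by simp [hp]), if_neg (by simp [hp]), ih]

-- per-document score equality: A's accumulator equals B's closed-form sum
theorem pv_score_eq (uil doc : String) :
    pvScoredA uil doc =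
      (pvScoreB ((PySem.Str.split₀ uil).filter (fun w => PySem.Str.len w > 2))
        (pvSynonyms.filter (fun kv =>
          PySem.Str.isIn kv.1 uil || kv.2.any (fun v => PySem.Str.isIn v uil))) doc, doc) := by
  simp only [pvScoredA, pvScoreB, pv_fold_count, pv_fold_syn, pv_fold_first, zero_add]

-- B's while-loop insertion IS stable-descending insertBy (the step of Python's stable reverse sort)
theorem pv_ins_eq_insertBy (x : Int × String) :
    ∀ acc, pvIns x acc = PySem.List.insertBy (fun a b => decide (b.1 < a.1)) x acc := by
  intro acc
  induction acc with
  | nil => rfl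
  | cons y ys ih =>
    simp only [pvIns, PySem.List.insertBy, ih]
    by_cases h : y.1 ≥ x.1
    · rw [if_pos h, if_neg (by simp; omega)]
    · rw [if_neg h, if_pos (by simp; omega)]

-- truncating the buffer before inserting does not change the first k entries
theorem pv_take_insertBy {α : Type} (p : α → α → Bool) (x : α) :
    ∀ (k : Nat) (acc : List α),
      (PySem.List.insertBy p x (acc.take k)).take k = (PySem.List.insertBy p x acc).take k := by
  intro k acc
  induction acc generalizing k with
  | nil => simp
  | cons y ys ih =>
    cases k with
    | zero => simp
    | succ k =>
      simp only [List.take_succ_cons, PySem.List.insertBy]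
      by_cases h : p x y = true
      · rw [if_pos h, if_pos h]
        simp only [List.take_succ_cons]
        cases k with
        | zero => simp
        | succ k => simp [List.take_take]
      · rw [if_neg h, if_neg h]
        simp only [List.take_succ_cons, ih]

-- the bounded-buffer fold computes the first k entries of the full insertion fold
theorem pv_fold_take {α β : Type} (p : α → α → Bool) (f : β → α) (k : Nat) :
    ∀ (xs : List β) (acc : List α),
      xs.foldl (fun st d => (PySem.List.insertBy p (f d) st).take k) (acc.take k)
        = (xs.foldl (fun st d => PySem.List.insertBy p (f d) st) acc).take k := by
  intro xs
  induction xs with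
  | nil => intro acc; simp
  | cons x t ih =>
    intro acc
    simp only [List.foldl_cons, pv_take_insertBy, ih]

-- B's top buffer = the first 3 of A's stable reverse sort of the scored pairs
theorem pv_top_eq (score : String → Int) (docs : List String) :
    docs.foldl (fun acc doc => (pvIns (score doc, doc) acc).take 3) []
      = (PySem.List.sorted (docs.map (fun d => (score d, d))) (fun x => x.1) true).take 3 := by
  rw [PySem.List.sorted_rev_eq_foldl_insertBy, List.foldl_map]
  have h := pv_fold_take (fun a b : Int × String => decide (b.1 < a.1))
    (fun d => (score d, d)) 3 docs []
  simp only [List.take_nil] at h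
  rw [← h]
  simp only [pv_ins_eq_insertBy]

-- A's top-3 pick loop (append behind a score>0 guard) is filter-then-map
theorem pv_fold_pick : ∀ (xs : List (Int × String)) (acc : List String),
    xs.foldl (fun acc sd => if sd.1 > 0 then acc ++ [sd.2] else acc) acc
      = acc ++ (xs.filter (fun sd => sd.1 > 0)).map (fun sd => sd.2) := by
  intro xs
  induction xs with
  | nil => intro acc; simp
  | cons x t ih =>
    intro acc
    by_cases h : x.1 > 0 <;> simp [h, ih]

-- ===== VERDICT (by name: the statement is the Claim_ definition above) =====
theorem run_retrieval_spec : Claim_equal_run_retrieval := by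
  intro user_input knowledge_base_docs _
  unfold Spec_run_retrieval
  have hsl : ∀ (xs : List (Int × String)), PySem.List.slice xs none (some 3) = xs.take 3 := by
    intro xs; rw [PySem.List.slice_to _ (by norm_num)]; rfl
  simp only [run_retrieval, run_retrieval_alt, PySem.List.foldl_append_singleton_eq_map,
    List.nil_append, pv_score_eq, pv_top_eq, pv_fold_pick, hsl]
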